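-- pv_equiv track=rewrite | github.com/ArwaaMamdoh23/PresentSenseAI | application.py | analyze_post_interruption_speech
-- ===== SOURCE A (Python) =====
-- def analyze_post_interruption_speech(posture, gesture, refined_emotion, eye_contact, interruptions):
--     """Analyze speaker's response to interruptions and provide feedback."""
--     feedback = set()  # Using a set to store feedback and eliminate duplicates
--     audience_feedback = []  # Will hold the audience interaction feedback specifically
--
--     # Check if the interruptions list is empty
--     if not interruptions:
--         # No interruptions, add the appropriate feedback for no interaction
--         audience_feedback.append("No interaction with the audience detected.")
--     else:
--         # If there were interruptions, process feedback
--         for interruption in interruptions: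
--             # Analyzing posture after interruption
--             if posture == "Crossed Arms":
--                 feedback.add("The speaker seems defensive after the interruption.")
--             elif posture == "Leaning Back":
--                 feedback.add("The speaker seems relaxed after the interruption.")
--             elif posture == "Arms on Hips":
--                 feedback.add("The speaker appears confident but might be aggressive after the interruption.")
--             elif posture == "Slouching":
--                 feedback.add("The speaker seems disengaged or insecure after the interruption.")
--             elif posture == "Head Down":
--                 feedback.add("The speaker may feel defeated or unsure after the interruption.")
--             elif posture == "Head Up":
--                 feedback.add("The speaker seems confident and unphased after the interruption.")
--             elif posture == "Hands in Pockets":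
--                 feedback.add("The speaker seems distant or detached after the interruption.")
--             else:
--                 feedback.add("Unrecognized posture. Please check the input.")
--
--             # Analyzing gestures after interruption
--             if gesture == "Thumbs Up":
--                 feedback.add("The speaker is reassuring and positive despite the interruption.")
--             elif gesture == "Thumbs Down":
--                 feedback.add("The speaker is likely displeased or frustrated after the interruption.")
--             elif gesture == "OK Sign":
--                 feedback.add("The speaker may be trying to convey agreement but seems hesitant.")
--             elif gesture == "Victory Sign":
--                 feedback.add("The speaker shows confidence and success, but might be mocking after the interruption.")
--             elif gesture == "Closed Fist":
--                 feedback.add("The speaker seems determined but possibly frustrated after the interruption.")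
--             elif gesture == "Pointing Finger":
--                 feedback.add("The speaker may be emphasizing a point more forcefully after the interruption.")
--             elif gesture == "Open Palm":
--                 feedback.add("The speaker is showing honesty and openness after the interruption.")
--             else:
--                 feedback.add("Unrecognized gesture. Please check the input.")
--
--            # Separate handling of refined emotions after interruption
--             if refined_emotion == "attentive":
--                 feedback.add("You appear attentive. Keep your facial expressions engaging.")
--             elif refined_emotion == "indifferent":
--                 feedback.add("Try to add more warmth to your expression for a more approachable look.")
--             elif refined_emotion == "intense":
--                 feedback.add("Your intensity shows determination, but be mindful not to appear hostile.")
--             elif refined_emotion == "defensive":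
--                 feedback.add("Lack of eye contact with anger may appear defensive. Try to calm down and engage more openly.")
--             elif refined_emotion == "nervous":
--                 feedback.add("Nervousness is noticeable. Maintain steady eye contact to show confidence.")
--             elif refined_emotion == "distrust":
--                 feedback.add("Avoid avoiding eye contact; it can make you appear untrustworthy. Try to relax and engage more.")
--             elif refined_emotion == "joyful":
--                 feedback.add("You're radiating joy! Keep the positivity and maintain eye contact for a more connected look.")
--             elif refined_emotion == "content":
--                 feedback.add("You're happy, but make sure to engage with your audience by maintaining eye contact.")
--             elif refined_emotion == "vulnerable":
--                 feedback.add("You seem vulnerable. Try smiling to lighten the mood if you're comfortable.")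
--             elif refined_emotion == "isolated":
--                 feedback.add("Lack of eye contact combined with sadness may appear disengaged. Try to make eye contact for a stronger presence.")
--             elif refined_emotion == "alert":
--                 feedback.add("You seem alert! Maintain eye contact to help convey your surprise more clearly.")
--             elif refined_emotion == "disoriented":
--                 feedback.add("You're surprised but seem disconnected. Try focusing and engaging with your audience.")
--             else:
--                 feedback.add("Unknown emotion. Try to maintain a balanced expression to convey clarity.")
--
--             # Analyzing eye contact after interruption
--             if eye_contact == "No Eye Contact":
--                 feedback.add("The speaker avoids eye contact after the interruption, possibly indicating discomfort.")
--             elif eye_contact == "Eye Contact":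
--                 feedback.add("The speaker maintains eye contact, showing confidence despite the interruption.")
--             else:
--                 feedback.add("Unrecognized eye contact. Please check the input.")
--
--     # Combine all feedback into the final report
--     if audience_feedback:
--         return audience_feedback
--     else:
--         return list(feedback)
-- ===== SOURCE B (Python) =====
-- POSTURE_FEEDBACK = {
--     "Crossed Arms": "The speaker seems defensive after the interruption.",
--     "Leaning Back": "The speaker seems relaxed after the interruption.",
--     "Arms on Hips": "The speaker appears confident but might be aggressive after the interruption.",
--     "Slouching": "The speaker seems disengaged or insecure after the interruption.",
--     "Head Down": "The speaker may feel defeated or unsure after the interruption.",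
--     "Head Up": "The speaker seems confident and unphased after the interruption.",
--     "Hands in Pockets": "The speaker seems distant or detached after the interruption.",
-- }
--
-- GESTURE_FEEDBACK = {
--     "Thumbs Up": "The speaker is reassuring and positive despite the interruption.",
--     "Thumbs Down": "The speaker is likely displeased or frustrated after the interruption.",
--     "OK Sign": "The speaker may be trying to convey agreement but seems hesitant.",
--     "Victory Sign": "The speaker shows confidence and success, but might be mocking after the interruption.",
--     "Closed Fist": "The speaker seems determined but possibly frustrated after the interruption.",
--     "Pointing Finger": "The speaker may be emphasizing a point more forcefully after the interruption.",
--     "Open Palm": "The speaker is showing honesty and openness after the interruption.",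
-- }
--
-- EMOTION_FEEDBACK = {
--     "attentive": "You appear attentive. Keep your facial expressions engaging.",
--     "indifferent": "Try to add more warmth to your expression for a more approachable look.",
--     "intense": "Your intensity shows determination, but be mindful not to appear hostile.",
--     "defensive": "Lack of eye contact with anger may appear defensive. Try to calm down and engage more openly.",
--     "nervous": "Nervousness is noticeable. Maintain steady eye contact to show confidence.",
--     "distrust": "Avoid avoiding eye contact; it can make you appear untrustworthy. Try to relax and engage more.",
--     "joyful": "You're radiating joy! Keep the positivity and maintain eye contact for a more connected look.",
--     "content": "You're happy, but make sure to engage with your audience by maintaining eye contact.",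
--     "vulnerable": "You seem vulnerable. Try smiling to lighten the mood if you're comfortable.",
--     "isolated": "Lack of eye contact combined with sadness may appear disengaged. Try to make eye contact for a stronger presence.",
--     "alert": "You seem alert! Maintain eye contact to help convey your surprise more clearly.",
--     "disoriented": "You're surprised but seem disconnected. Try focusing and engaging with your audience.",
-- }
--
-- EYE_CONTACT_FEEDBACK = {
--     "No Eye Contact": "The speaker avoids eye contact after the interruption, possibly indicating discomfort.",
--     "Eye Contact": "The speaker maintains eye contact, showing confidence despite the interruption.",
-- }
--
--
-- def analyze_post_interruption_speech(posture, gesture, refined_emotion, eye_contact, interruptions):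
--     """Analyze speaker's response to interruptions and provide feedback."""
--     if not interruptions:
--         return ["No interaction with the audience detected."]
--     feedback = {
--         POSTURE_FEEDBACK.get(posture, "Unrecognized posture. Please check the input."),
--         GESTURE_FEEDBACK.get(gesture, "Unrecognized gesture. Please check the input."),
--         EMOTION_FEEDBACK.get(refined_emotion, "Unknown emotion. Try to maintain a balanced expression to convey clarity."),
--         EYE_CONTACT_FEEDBACK.get(eye_contact, "Unrecognized eye contact. Please check the input."),
--     }
--     return list(feedback)
-- ===== Notes on version B (the rewrite author's own statement) =====
-- stated objective: faster
-- what changed: Replaces A's per-interruption loop re-running four if/elif chains (and re-adding to a set each iteration) with four module-level dispatch dictionaries consulted exactly once, building the four-message feedback set in one shot regardless of how many interruptions there are.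
import Mathlib
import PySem

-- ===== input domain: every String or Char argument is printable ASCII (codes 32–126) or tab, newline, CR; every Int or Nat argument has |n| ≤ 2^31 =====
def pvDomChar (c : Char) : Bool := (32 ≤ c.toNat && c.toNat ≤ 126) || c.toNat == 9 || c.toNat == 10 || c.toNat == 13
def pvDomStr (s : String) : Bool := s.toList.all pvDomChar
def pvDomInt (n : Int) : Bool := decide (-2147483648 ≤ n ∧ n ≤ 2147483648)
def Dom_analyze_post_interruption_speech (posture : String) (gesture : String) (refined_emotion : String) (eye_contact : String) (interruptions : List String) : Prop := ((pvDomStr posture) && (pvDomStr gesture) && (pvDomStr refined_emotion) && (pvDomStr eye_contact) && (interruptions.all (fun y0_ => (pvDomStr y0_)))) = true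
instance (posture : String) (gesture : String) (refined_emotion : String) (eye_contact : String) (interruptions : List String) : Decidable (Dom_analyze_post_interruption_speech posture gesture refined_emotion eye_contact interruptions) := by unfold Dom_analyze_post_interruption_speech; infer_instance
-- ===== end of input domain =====

-- B replaces A's per-interruption loop of four if/elif chains by four module-level dispatch
-- dictionaries consulted once; return-value equivalence only (Python's list(set) order is
-- compared as a set by the harness; both ports emit insertion order).

-- ===== PORT A =====
-- the body of A's 'for interruption in interruptions' loop: four if/elif blocks, in order
def pvAddPostureA (posture : String) (fb : PySem.Set String) : PySem.Set String :=
  if posture = "Crossed Arms" then PySem.Set.add fb "The speaker seems defensive after the interruption."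
  else if posture = "Leaning Back" then PySem.Set.add fb "The speaker seems relaxed after the interruption."
  else if posture = "Arms on Hips" then PySem.Set.add fb "The speaker appears confident but might be aggressive after the interruption."
  else if posture = "Slouching" then PySem.Set.add fb "The speaker seems disengaged or insecure after the interruption."
  else if posture = "Head Down" then PySem.Set.add fb "The speaker may feel defeated or unsure after the interruption."
  else if posture = "Head Up" then PySem.Set.add fb "The speaker seems confident and unphased after the interruption."
  else if posture = "Hands in Pockets" then PySem.Set.add fb "The speaker seems distant or detached after the interruption."
  else PySem.Set.add fb "Unrecognized posture. Please check the input."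

def pvAddGestureA (gesture : String) (fb : PySem.Set String) : PySem.Set String :=
  if gesture = "Thumbs Up" then PySem.Set.add fb "The speaker is reassuring and positive despite the interruption."
  else if gesture = "Thumbs Down" then PySem.Set.add fb "The speaker is likely displeased or frustrated after the interruption."
  else if gesture = "OK Sign" then PySem.Set.add fb "The speaker may be trying to convey agreement but seems hesitant."
  else if gesture = "Victory Sign" then PySem.Set.add fb "The speaker shows confidence and success, but might be mocking after the interruption."
  else if gesture = "Closed Fist" then PySem.Set.add fb "The speaker seems determined but possibly frustrated after the interruption."
  else if gesture = "Pointing Finger" then PySem.Set.add fb "The speaker may be emphasizing a point more forcefully after the interruption."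
  else if gesture = "Open Palm" then PySem.Set.add fb "The speaker is showing honesty and openness after the interruption."
  else PySem.Set.add fb "Unrecognized gesture. Please check the input."

def pvAddEmotionA (refined_emotion : String) (fb : PySem.Set String) : PySem.Set String :=
  if refined_emotion = "attentive" then PySem.Set.add fb "You appear attentive. Keep your facial expressions engaging."
  else if refined_emotion = "indifferent" then PySem.Set.add fb "Try to add more warmth to your expression for a more approachable look."
  else if refined_emotion = "intense" then PySem.Set.add fb "Your intensity shows determination, but be mindful not to appear hostile."
  else if refined_emotion = "defensive" then PySem.Set.add fb "Lack of eye contact with anger may appear defensive. Try to calm down and engage more openly."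
  else if refined_emotion = "nervous" then PySem.Set.add fb "Nervousness is noticeable. Maintain steady eye contact to show confidence."
  else if refined_emotion = "distrust" then PySem.Set.add fb "Avoid avoiding eye contact; it can make you appear untrustworthy. Try to relax and engage more."
  else if refined_emotion = "joyful" then PySem.Set.add fb "You're radiating joy! Keep the positivity and maintain eye contact for a more connected look."
  else if refined_emotion = "content" then PySem.Set.add fb "You're happy, but make sure to engage with your audience by maintaining eye contact."
  else if refined_emotion = "vulnerable" then PySem.Set.add fb "You seem vulnerable. Try smiling to lighten the mood if you're comfortable."
  else if refined_emotion = "isolated" then PySem.Set.add fb "Lack of eye contact combined with sadness may appear disengaged. Try to make eye contact for a stronger presence."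
  else if refined_emotion = "alert" then PySem.Set.add fb "You seem alert! Maintain eye contact to help convey your surprise more clearly."
  else if refined_emotion = "disoriented" then PySem.Set.add fb "You're surprised but seem disconnected. Try focusing and engaging with your audience."
  else PySem.Set.add fb "Unknown emotion. Try to maintain a balanced expression to convey clarity."

def pvAddEyeA (eye_contact : String) (fb : PySem.Set String) : PySem.Set String :=
  if eye_contact = "No Eye Contact" then PySem.Set.add fb "The speaker avoids eye contact after the interruption, possibly indicating discomfort."
  else if eye_contact = "Eye Contact" then PySem.Set.add fb "The speaker maintains eye contact, showing confidence despite the interruption."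
  else PySem.Set.add fb "Unrecognized eye contact. Please check the input."

def pvStepA (posture gesture refined_emotion eye_contact : String) (fb : PySem.Set String) : PySem.Set String :=
  pvAddEyeA eye_contact (pvAddEmotionA refined_emotion (pvAddGestureA gesture (pvAddPostureA posture fb)))

def analyze_post_interruption_speech (posture : String) (gesture : String) (refined_emotion : String) (eye_contact : String) (interruptions : List String) : List String :=
  let feedback : PySem.Set String := PySem.Set.empty
  let audience_feedback : List String := []
  let (feedback, audience_feedback) :=
    if interruptions = [] then
      (feedback, audience_feedback ++ ["No interaction with the audience detected."])
    else
      (interruptions.foldl (fun fb _interruption => pvStepA posture gesture refined_emotion eye_contact fb) feedback,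
       audience_feedback)
  if audience_feedback ≠ [] then audience_feedback else feedback

-- ===== PORT B =====
def pvPostureFeedback : PySem.Dict String String := PySem.Dict.mk
  [("Crossed Arms", "The speaker seems defensive after the interruption."),
   ("Leaning Back", "The speaker seems relaxed after the interruption."),
   ("Arms on Hips", "The speaker appears confident but might be aggressive after the interruption."),
   ("Slouching", "The speaker seems disengaged or insecure after the interruption."),
   ("Head Down", "The speaker may feel defeated or unsure after the interruption."),
   ("Head Up", "The speaker seems confident and unphased after the interruption."),
   ("Hands in Pockets", "The speaker seems distant or detached after the interruption.")]

def pvGestureFeedback : PySem.Dict String String := PySem.Dict.mk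
  [("Thumbs Up", "The speaker is reassuring and positive despite the interruption."),
   ("Thumbs Down", "The speaker is likely displeased or frustrated after the interruption."),
   ("OK Sign", "The speaker may be trying to convey agreement but seems hesitant."),
   ("Victory Sign", "The speaker shows confidence and success, but might be mocking after the interruption."),
   ("Closed Fist", "The speaker seems determined but possibly frustrated after the interruption."),
   ("Pointing Finger", "The speaker may be emphasizing a point more forcefully after the interruption."),
   ("Open Palm", "The speaker is showing honesty and openness after the interruption.")]

def pvEmotionFeedback : PySem.Dict String String := PySem.Dict.mk
  [("attentive", "You appear attentive. Keep your facial expressions engaging."),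
   ("indifferent", "Try to add more warmth to your expression for a more approachable look."),
   ("intense", "Your intensity shows determination, but be mindful not to appear hostile."),
   ("defensive", "Lack of eye contact with anger may appear defensive. Try to calm down and engage more openly."),
   ("nervous", "Nervousness is noticeable. Maintain steady eye contact to show confidence."),
   ("distrust", "Avoid avoiding eye contact; it can make you appear untrustworthy. Try to relax and engage more."),
   ("joyful", "You're radiating joy! Keep the positivity and maintain eye contact for a more connected look."),
   ("content", "You're happy, but make sure to engage with your audience by maintaining eye contact."),
   ("vulnerable", "You seem vulnerable. Try smiling to lighten the mood if you're comfortable."),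
   ("isolated", "Lack of eye contact combined with sadness may appear disengaged. Try to make eye contact for a stronger presence."),
   ("alert", "You seem alert! Maintain eye contact to help convey your surprise more clearly."),
   ("disoriented", "You're surprised but seem disconnected. Try focusing and engaging with your audience.")]

def pvEyeContactFeedback : PySem.Dict String String := PySem.Dict.mk
  [("No Eye Contact", "The speaker avoids eye contact after the interruption, possibly indicating discomfort."),
   ("Eye Contact", "The speaker maintains eye contact, showing confidence despite the interruption.")]

def analyze_post_interruption_speech_alt (posture : String) (gesture : String) (refined_emotion : String) (eye_contact : String) (interruptions : List String) : List String :=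
  if interruptions = [] then ["No interaction with the audience detected."]
  else
    let feedback : PySem.Set String := PySem.Set.ofList
      [pvPostureFeedback.getD posture "Unrecognized posture. Please check the input.",
       pvGestureFeedback.getD gesture "Unrecognized gesture. Please check the input.",
       pvEmotionFeedback.getD refined_emotion "Unknown emotion. Try to maintain a balanced expression to convey clarity.",
       pvEyeContactFeedback.getD eye_contact "Unrecognized eye contact. Please check the input."]
    feedback

-- ===== PRECONDITION & SPEC =====
def Spec_analyze_post_interruption_speech (posture : String) (gesture : String) (refined_emotion : String) (eye_contact : String) (interruptions : List String) (out : List String) : Prop := out = analyze_post_interruption_speech_alt posture gesture refined_emotion eye_contact interruptions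
instance (posture : String) (gesture : String) (refined_emotion : String) (eye_contact : String) (interruptions : List String) (out : List String) : Decidable (Spec_analyze_post_interruption_speech posture gesture refined_emotion eye_contact interruptions out) := by unfold Spec_analyze_post_interruption_speech; infer_instance

-- ===== CLAIM (what is proved, stated in full; the proofs are below) =====
def Claim_equal_analyze_post_interruption_speech : Prop := ∀ (posture : String) (gesture : String) (refined_emotion : String) (eye_contact : String) (interruptions : List String), Dom_analyze_post_interruption_speech posture gesture refined_emotion eye_contact interruptions → Spec_analyze_post_interruption_speech posture gesture refined_emotion eye_contact interruptions (analyze_post_interruption_speech posture gesture refined_emotion eye_contact interruptions)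

-- ===== LEMMAS AND PROOFS =====

-- the message each if/elif block of A selects, as a function of the input string
def pvPostureMsg (posture : String) : String :=
  if posture = "Crossed Arms" then "The speaker seems defensive after the interruption."
  else if posture = "Leaning Back" then "The speaker seems relaxed after the interruption."
  else if posture = "Arms on Hips" then "The speaker appears confident but might be aggressive after the interruption."
  else if posture = "Slouching" then "The speaker seems disengaged or insecure after the interruption."
  else if posture = "Head Down" then "The speaker may feel defeated or unsure after the interruption."
  else if posture = "Head Up" then "The speaker seems confident and unphased after the interruption."
  else if posture = "Hands in Pockets" then "The speaker seems distant or detached after the interruption."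
  else "Unrecognized posture. Please check the input."

def pvGestureMsg (gesture : String) : String :=
  if gesture = "Thumbs Up" then "The speaker is reassuring and positive despite the interruption."
  else if gesture = "Thumbs Down" then "The speaker is likely displeased or frustrated after the interruption."
  else if gesture = "OK Sign" then "The speaker may be trying to convey agreement but seems hesitant."
  else if gesture = "Victory Sign" then "The speaker shows confidence and success, but might be mocking after the interruption."
  else if gesture = "Closed Fist" then "The speaker seems determined but possibly frustrated after the interruption."
  else if gesture = "Pointing Finger" then "The speaker may be emphasizing a point more forcefully after the interruption."
  else if gesture = "Open Palm" then "The speaker is showing honesty and openness after the interruption."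
  else "Unrecognized gesture. Please check the input."

def pvEmotionMsg (refined_emotion : String) : String :=
  if refined_emotion = "attentive" then "You appear attentive. Keep your facial expressions engaging."
  else if refined_emotion = "indifferent" then "Try to add more warmth to your expression for a more approachable look."
  else if refined_emotion = "intense" then "Your intensity shows determination, but be mindful not to appear hostile."
  else if refined_emotion = "defensive" then "Lack of eye contact with anger may appear defensive. Try to calm down and engage more openly."
  else if refined_emotion = "nervous" then "Nervousness is noticeable. Maintain steady eye contact to show confidence."
  else if refined_emotion = "distrust" then "Avoid avoiding eye contact; it can make you appear untrustworthy. Try to relax and engage more."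
  else if refined_emotion = "joyful" then "You're radiating joy! Keep the positivity and maintain eye contact for a more connected look."
  else if refined_emotion = "content" then "You're happy, but make sure to engage with your audience by maintaining eye contact."
  else if refined_emotion = "vulnerable" then "You seem vulnerable. Try smiling to lighten the mood if you're comfortable."
  else if refined_emotion = "isolated" then "Lack of eye contact combined with sadness may appear disengaged. Try to make eye contact for a stronger presence."
  else if refined_emotion = "alert" then "You seem alert! Maintain eye contact to help convey your surprise more clearly."
  else if refined_emotion = "disoriented" then "You're surprised but seem disconnected. Try focusing and engaging with your audience."
  else "Unknown emotion. Try to maintain a balanced expression to convey clarity."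

def pvEyeMsg (eye_contact : String) : String :=
  if eye_contact = "No Eye Contact" then "The speaker avoids eye contact after the interruption, possibly indicating discomfort."
  else if eye_contact = "Eye Contact" then "The speaker maintains eye contact, showing confidence despite the interruption."
  else "Unrecognized eye contact. Please check the input."

theorem pvAddPostureA_eq (posture : String) (fb : PySem.Set String) :
    pvAddPostureA posture fb = PySem.Set.add fb (pvPostureMsg posture) := by
  unfold pvAddPostureA pvPostureMsg; repeat' split
  all_goals rfl

theorem pvAddGestureA_eq (gesture : String) (fb : PySem.Set String) :
    pvAddGestureA gesture fb = PySem.Set.add fb (pvGestureMsg gesture) := by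
  unfold pvAddGestureA pvGestureMsg; repeat' split
  all_goals rfl

theorem pvAddEmotionA_eq (refined_emotion : String) (fb : PySem.Set String) :
    pvAddEmotionA refined_emotion fb = PySem.Set.add fb (pvEmotionMsg refined_emotion) := by
  unfold pvAddEmotionA pvEmotionMsg
  by_cases h1 : refined_emotion = "attentive"
  · rw [if_pos h1, if_pos h1]
  rw [if_neg h1, if_neg h1]
  by_cases h2 : refined_emotion = "indifferent"
  · rw [if_pos h2, if_pos h2]
  rw [if_neg h2, if_neg h2]
  by_cases h3 : refined_emotion = "intense"
  · rw [if_pos h3, if_pos h3]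
  rw [if_neg h3, if_neg h3]
  by_cases h4 : refined_emotion = "defensive"
  · rw [if_pos h4, if_pos h4]
  rw [if_neg h4, if_neg h4]
  by_cases h5 : refined_emotion = "nervous"
  · rw [if_pos h5, if_pos h5]
  rw [if_neg h5, if_neg h5]
  by_cases h6 : refined_emotion = "distrust"
  · rw [if_pos h6, if_pos h6]
  rw [if_neg h6, if_neg h6]
  by_cases h7 : refined_emotion = "joyful"
  · rw [if_pos h7, if_pos h7]
  rw [if_neg h7, if_neg h7]
  by_cases h8 : refined_emotion = "content"
  · rw [if_pos h8, if_pos h8]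
  rw [if_neg h8, if_neg h8]
  by_cases h9 : refined_emotion = "vulnerable"
  · rw [if_pos h9, if_pos h9]
  rw [if_neg h9, if_neg h9]
  by_cases h10 : refined_emotion = "isolated"
  · rw [if_pos h10, if_pos h10]
  rw [if_neg h10, if_neg h10]
  by_cases h11 : refined_emotion = "alert"
  · rw [if_pos h11, if_pos h11]
  rw [if_neg h11, if_neg h11]
  by_cases h12 : refined_emotion = "disoriented"
  · rw [if_pos h12, if_pos h12]
  rw [if_neg h12, if_neg h12]

theorem pvAddEyeA_eq (eye_contact : String) (fb : PySem.Set String) :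
    pvAddEyeA eye_contact fb = PySem.Set.add fb (pvEyeMsg eye_contact) := by
  unfold pvAddEyeA pvEyeMsg; repeat' split
  all_goals rfl

theorem pvStepA_eq (posture gesture refined_emotion eye_contact : String) (fb : PySem.Set String) :
    pvStepA posture gesture refined_emotion eye_contact fb =
      PySem.Set.add (PySem.Set.add (PySem.Set.add (PySem.Set.add fb (pvPostureMsg posture)) (pvGestureMsg gesture)) (pvEmotionMsg refined_emotion)) (pvEyeMsg eye_contact) := by
  simp [pvStepA, pvAddPostureA_eq, pvAddGestureA_eq, pvAddEmotionA_eq, pvAddEyeA_eq]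

theorem pvSet_add_of_mem {s : PySem.Set String} {x : String} (h : x ∈ s) :
    PySem.Set.add s x = s := by
  simp [PySem.Set.add, h]

theorem pvStepA_idem (posture gesture refined_emotion eye_contact : String) (fb : PySem.Set String) :
    pvStepA posture gesture refined_emotion eye_contact (pvStepA posture gesture refined_emotion eye_contact fb) =
      pvStepA posture gesture refined_emotion eye_contact fb := by
  rw [pvStepA_eq posture gesture refined_emotion eye_contact (pvStepA posture gesture refined_emotion eye_contact fb),
      pvStepA_eq posture gesture refined_emotion eye_contact fb]
  rw [pvSet_add_of_mem (by simp [PySem.Set.mem_add]), pvSet_add_of_mem (by simp [PySem.Set.mem_add]),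
      pvSet_add_of_mem (by simp [PySem.Set.mem_add]), pvSet_add_of_mem (by simp [PySem.Set.mem_add])]

theorem pvFold_stable (posture gesture refined_emotion eye_contact : String) (l : List String) (s : PySem.Set String)
    (h : pvStepA posture gesture refined_emotion eye_contact s = s) :
    l.foldl (fun fb _ => pvStepA posture gesture refined_emotion eye_contact fb) s = s := by
  induction l generalizing s with
  | nil => rfl
  | cons x xs ih => simpa [h] using ih s h

theorem pvDictStep (k v : String) (rest : List (String × String)) (x d : String) (h : x ≠ k) :
    (PySem.Dict.mk ((k, v) :: rest)).getD x d = (PySem.Dict.mk rest).getD x d := by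
  simp [PySem.Dict.getD_eq_get?_getD, PySem.Dict.get?_mk_cons, beq_iff_eq, Ne.symm h]

theorem pvDictHit (k v : String) (rest : List (String × String)) (d : String) :
    (PySem.Dict.mk ((k, v) :: rest)).getD k d = v := by
  simp [PySem.Dict.getD_eq_get?_getD, PySem.Dict.get?_mk_cons]

theorem pvGetD_posture (posture : String) :
    pvPostureFeedback.getD posture "Unrecognized posture. Please check the input." = pvPostureMsg posture := by
  unfold pvPostureFeedback pvPostureMsg
  by_cases h1 : posture = "Crossed Arms"
  · subst h1; rw [if_pos rfl]; exact pvDictHit _ _ _ _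
  rw [if_neg h1, pvDictStep _ _ _ _ _ h1]
  by_cases h2 : posture = "Leaning Back"
  · subst h2; rw [if_pos rfl]; exact pvDictHit _ _ _ _
  rw [if_neg h2, pvDictStep _ _ _ _ _ h2]
  by_cases h3 : posture = "Arms on Hips"
  · subst h3; rw [if_pos rfl]; exact pvDictHit _ _ _ _
  rw [if_neg h3, pvDictStep _ _ _ _ _ h3]
  by_cases h4 : posture = "Slouching"
  · subst h4; rw [if_pos rfl]; exact pvDictHit _ _ _ _
  rw [if_neg h4, pvDictStep _ _ _ _ _ h4]
  by_cases h5 : posture = "Head Down"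
  · subst h5; rw [if_pos rfl]; exact pvDictHit _ _ _ _
  rw [if_neg h5, pvDictStep _ _ _ _ _ h5]
  by_cases h6 : posture = "Head Up"
  · subst h6; rw [if_pos rfl]; exact pvDictHit _ _ _ _
  rw [if_neg h6, pvDictStep _ _ _ _ _ h6]
  by_cases h7 : posture = "Hands in Pockets"
  · subst h7; rw [if_pos rfl]; exact pvDictHit _ _ _ _
  rw [if_neg h7, pvDictStep _ _ _ _ _ h7]
  rfl

theorem pvGetD_gesture (gesture : String) :
    pvGestureFeedback.getD gesture "Unrecognized gesture. Please check the input." = pvGestureMsg gesture := by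
  unfold pvGestureFeedback pvGestureMsg
  by_cases h1 : gesture = "Thumbs Up"
  · subst h1; rw [if_pos rfl]; exact pvDictHit _ _ _ _
  rw [if_neg h1, pvDictStep _ _ _ _ _ h1]
  by_cases h2 : gesture = "Thumbs Down"
  · subst h2; rw [if_pos rfl]; exact pvDictHit _ _ _ _
  rw [if_neg h2, pvDictStep _ _ _ _ _ h2]
  by_cases h3 : gesture = "OK Sign"
  · subst h3; rw [if_pos rfl]; exact pvDictHit _ _ _ _
  rw [if_neg h3, pvDictStep _ _ _ _ _ h3]
  by_cases h4 : gesture = "Victory Sign"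
  · subst h4; rw [if_pos rfl]; exact pvDictHit _ _ _ _
  rw [if_neg h4, pvDictStep _ _ _ _ _ h4]
  by_cases h5 : gesture = "Closed Fist"
  · subst h5; rw [if_pos rfl]; exact pvDictHit _ _ _ _
  rw [if_neg h5, pvDictStep _ _ _ _ _ h5]
  by_cases h6 : gesture = "Pointing Finger"
  · subst h6; rw [if_pos rfl]; exact pvDictHit _ _ _ _
  rw [if_neg h6, pvDictStep _ _ _ _ _ h6]
  by_cases h7 : gesture = "Open Palm"
  · subst h7; rw [if_pos rfl]; exact pvDictHit _ _ _ _
  rw [if_neg h7, pvDictStep _ _ _ _ _ h7]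
  rfl

theorem pvGetD_emotion (refined_emotion : String) :
    pvEmotionFeedback.getD refined_emotion "Unknown emotion. Try to maintain a balanced expression to convey clarity." = pvEmotionMsg refined_emotion := by
  unfold pvEmotionFeedback pvEmotionMsg
  by_cases h1 : refined_emotion = "attentive"
  · subst h1; rw [if_pos rfl]; exact pvDictHit _ _ _ _
  rw [if_neg h1, pvDictStep _ _ _ _ _ h1]
  by_cases h2 : refined_emotion = "indifferent"
  · subst h2; rw [if_pos rfl]; exact pvDictHit _ _ _ _
  rw [if_neg h2, pvDictStep _ _ _ _ _ h2]
  by_cases h3 : refined_emotion = "intense"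
  · subst h3; rw [if_pos rfl]; exact pvDictHit _ _ _ _
  rw [if_neg h3, pvDictStep _ _ _ _ _ h3]
  by_cases h4 : refined_emotion = "defensive"
  · subst h4; rw [if_pos rfl]; exact pvDictHit _ _ _ _
  rw [if_neg h4, pvDictStep _ _ _ _ _ h4]
  by_cases h5 : refined_emotion = "nervous"
  · subst h5; rw [if_pos rfl]; exact pvDictHit _ _ _ _
  rw [if_neg h5, pvDictStep _ _ _ _ _ h5]
  by_cases h6 : refined_emotion = "distrust"
  · subst h6; rw [if_pos rfl]; exact pvDictHit _ _ _ _
  rw [if_neg h6, pvDictStep _ _ _ _ _ h6]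
  by_cases h7 : refined_emotion = "joyful"
  · subst h7; rw [if_pos rfl]; exact pvDictHit _ _ _ _
  rw [if_neg h7, pvDictStep _ _ _ _ _ h7]
  by_cases h8 : refined_emotion = "content"
  · subst h8; rw [if_pos rfl]; exact pvDictHit _ _ _ _
  rw [if_neg h8, pvDictStep _ _ _ _ _ h8]
  by_cases h9 : refined_emotion = "vulnerable"
  · subst h9; rw [if_pos rfl]; exact pvDictHit _ _ _ _
  rw [if_neg h9, pvDictStep _ _ _ _ _ h9]
  by_cases h10 : refined_emotion = "isolated"
  · subst h10; rw [if_pos rfl]; exact pvDictHit _ _ _ _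
  rw [if_neg h10, pvDictStep _ _ _ _ _ h10]
  by_cases h11 : refined_emotion = "alert"
  · subst h11; rw [if_pos rfl]; exact pvDictHit _ _ _ _
  rw [if_neg h11, pvDictStep _ _ _ _ _ h11]
  by_cases h12 : refined_emotion = "disoriented"
  · subst h12; rw [if_pos rfl]; exact pvDictHit _ _ _ _
  rw [if_neg h12, pvDictStep _ _ _ _ _ h12]
  rfl

theorem pvGetD_eye (eye_contact : String) :
    pvEyeContactFeedback.getD eye_contact "Unrecognized eye contact. Please check the input." = pvEyeMsg eye_contact := by
  unfold pvEyeContactFeedback pvEyeMsg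
  by_cases h1 : eye_contact = "No Eye Contact"
  · subst h1; rw [if_pos rfl]; exact pvDictHit _ _ _ _
  rw [if_neg h1, pvDictStep _ _ _ _ _ h1]
  by_cases h2 : eye_contact = "Eye Contact"
  · subst h2; rw [if_pos rfl]; exact pvDictHit _ _ _ _
  rw [if_neg h2, pvDictStep _ _ _ _ _ h2]
  rfl

-- ===== VERDICT (by name: the statement is the Claim_ definition above) =====
theorem analyze_post_interruption_speech_spec : Claim_equal_analyze_post_interruption_speech := by
  intro posture gesture refined_emotion eye_contact interruptions _
  unfold Spec_analyze_post_interruption_speech analyze_post_interruption_speech analyze_post_interruption_speech_alt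
  by_cases h : interruptions = []
  · simp [h]
  · simp only [h, if_false, ne_eq, not_true_eq_false, List.nil_append]
    obtain ⟨x, xs, rfl⟩ : ∃ y ys, interruptions = y :: ys := by
      cases interruptions with
      | nil => exact absurd rfl h
      | cons y ys => exact ⟨y, ys, rfl⟩
    simp only [List.foldl_cons]
    rw [pvFold_stable _ _ _ _ xs _ (by
      have := pvStepA_idem posture gesture refined_emotion eye_contact PySem.Set.empty
      simpa using this)]
    rw [pvGetD_posture, pvGetD_gesture, pvGetD_emotion, pvGetD_eye]
    rw [pvStepA_eq]
    rfl
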